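-- pv_equiv track=rewrite | github.com/raveena029/IR | updated.py | create_soundex_index
-- ===== SOURCE A (Python) =====
-- def soundex(name):
--     name = name.upper()
--     soundex = name[0]
--
--     # Conversion table
--     conversions = {
--         'BFPV': '1', 'CGJKQSXZ': '2', 'DT': '3',
--         'L': '4', 'MN': '5', 'R': '6'
--     }
--
--     # Convert name to Soundex code
--     for char in name[1:]:
--         for key in conversions:
--             if char in key:
--                 code = conversions[key]
--                 if code != soundex[-1]:  # Only add if not the same as the last code
--                     soundex += code
--                 break
--         if len(soundex) == 4:
--             break
--
--     # Pad with zeros if necessary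
--     soundex = soundex.ljust(4, '0')
--
--     return soundex
--
-- def create_soundex_index(inverted_index):
--     soundex_index = {}
--     for word in inverted_index:
--         soundex_code = soundex(word)
--         if soundex_code in soundex_index:
--             soundex_index[soundex_code].add(word)
--         else:
--             soundex_index[soundex_code] = {word}
--     return soundex_index
-- ===== SOURCE B (Python) =====
-- _TABLE = ".123.12..22455.12623.1.2.2"  # soundex digit for each letter A..Z; '.' = ignored char
--
-- def _digit(c):
--     return _TABLE[ord(c) - 65] if 'A' <= c <= 'Z' else '.'
--
-- def _tail(s, i, prev, k):
--     # first k soundex digits of s[i:], skipping ignored chars and digits equal to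
--     # the previous emitted/compared character; zero-padded to exactly k characters
--     if k == 0 or i == len(s):
--         return '0' * k
--     d = _digit(s[i])
--     if d != '.' and d != prev:
--         return d + _tail(s, i + 1, d, k - 1)
--     return _tail(s, i + 1, prev, k)
--
-- def soundex(name):
--     u = name.upper()
--     return u[0] + _tail(u, 1, u[0], 3)
--
-- def create_soundex_index(inverted_index):
--     codes = {w: soundex(w) for w in inverted_index}
--     index = {c: set() for c in codes.values()}
--     for w, c in codes.items():
--         index[c].add(w)
--     return index
-- ===== Notes on version B (the rewrite author's own statement) =====
-- stated objective: alternative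
-- what changed: soundex becomes a recursive state machine over an ord-indexed 26-char digit table, carrying the previous compared character and a countdown of remaining digits with zero-padding in the base case (instead of A's nested dict-group scans with a last-char comparison, len==4 early break and ljust), and the grouping is done in three staged passes (a word-to-code dict, then a dict of empty sets for all codes, then a fill loop) instead of A's single interleaved membership-test loop.
import Mathlib
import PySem

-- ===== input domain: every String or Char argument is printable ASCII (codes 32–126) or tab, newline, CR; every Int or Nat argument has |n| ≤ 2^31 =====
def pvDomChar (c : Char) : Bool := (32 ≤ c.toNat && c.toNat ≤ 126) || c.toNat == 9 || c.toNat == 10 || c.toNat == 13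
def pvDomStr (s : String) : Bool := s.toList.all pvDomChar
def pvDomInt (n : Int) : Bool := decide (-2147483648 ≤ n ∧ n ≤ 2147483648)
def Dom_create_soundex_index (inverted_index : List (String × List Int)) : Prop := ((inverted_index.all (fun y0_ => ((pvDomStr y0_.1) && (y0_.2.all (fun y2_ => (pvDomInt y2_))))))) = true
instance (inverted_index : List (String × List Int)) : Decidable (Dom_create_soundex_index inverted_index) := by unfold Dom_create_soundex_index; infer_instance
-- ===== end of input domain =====

-- B computes soundex by a recursive state machine over an ord-indexed 26-char digit table
-- (padding folded into the recursion's base case) instead of A's nested dict-scan loops with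
-- early break and ljust, and builds the index in three staged passes (word→code dict, then
-- empty sets for all codes, then a fill pass) instead of A's single interleaved loop:
-- objective 'alternative'. Equal return values on Pre_ (no empty word keys).

-- ===== PORT A =====
-- A's conversion dict; the codes are single characters, kept as Char ('1' = "1"[0]) since every
-- code A manipulates has length 1.
def conversionsA : List (String × Char) :=
  [("BFPV", '1'), ("CGJKQSXZ", '2'), ("DT", '3'), ("L", '4'), ("MN", '5'), ("R", '6')]

-- inner 'for key in conversions: if char in key: code = …; break'
def innerLoopA : List (String × Char) → Char → Option Char
  | [], _ => none
  | (k, code) :: rest, c => if (k.toList).contains c then some code else innerLoopA rest c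

-- outer 'for char in name[1:]' loop; s is the soundex string built so far (as List Char)
def soundexLoopA : List Char → List Char → List Char
  | [], s => s
  | c :: rest, s =>
    let s' := match innerLoopA conversionsA c with
      | some code => if s.getLast? ≠ some code then s ++ [code] else s
      | none => s
    if s'.length = 4 then s' else soundexLoopA rest s'

def soundexA (name : String) : String :=
  match PySem.Chars.upper name.toList with
  | [] => ""   -- Python raises IndexError on name[0] here; excluded by Pre_
  | c :: rest =>
    let s := soundexLoopA rest [c]
    String.ofList (s ++ List.replicate (4 - s.length) '0')  -- s.ljust(4, '0')

def create_soundex_index (inverted_index : List (String × List Int)) : List (String × List String) :=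
  -- 'for word in inverted_index' iterates the dict's keys
  (((inverted_index.map Prod.fst).foldl (fun d word =>
      let code := soundexA word
      if PySem.Dict.contains d code then
        PySem.Dict.modify d code [] (fun s => PySem.Set.add s word)
      else
        PySem.Dict.insert d code (PySem.Set.ofList [word]))
    PySem.Dict.empty) : PySem.Dict String (PySem.Set String)).items

-- ===== PORT B =====
-- _TABLE = ".123.12..22455.12623.1.2.2"
def tableB : List Char := ".123.12..22455.12623.1.2.2".toList

-- _digit(c): _TABLE[ord(c) - 65] if 'A' <= c <= 'Z' else '.'  (the guard makes the index in range)
def digitB (c : Char) : Char :=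
  if 'A' ≤ c ∧ c ≤ 'Z' then tableB.getD (c.toNat - 65) '.' else '.'

-- _tail(s, i, prev, k): recursion on the suffix s[i:] (the obvious structural recursion for
-- B's index recursion; 'i == len(s)' becomes the [] case), '0' * k pads in the base case
def tailB : List Char → Char → Nat → List Char
  | _, _, 0 => []
  | [], _, k + 1 => List.replicate (k + 1) '0'
  | c :: rest, prev, k + 1 =>
    let d := digitB c
    if d ≠ '.' ∧ d ≠ prev then d :: tailB rest d k else tailB rest prev (k + 1)

def soundexB (name : String) : String :=
  match PySem.Chars.upper name.toList with
  | [] => ""   -- Python raises IndexError on u[0] here; excluded by Pre_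
  | f :: rest => String.ofList (f :: tailB rest f 3)

def create_soundex_index_alt (inverted_index : List (String × List Int)) : List (String × List String) :=
  -- codes = {w: soundex(w) for w in inverted_index}
  let codes : PySem.Dict String String :=
    (inverted_index.map Prod.fst).foldl (fun d w => PySem.Dict.insert d w (soundexB w))
      PySem.Dict.empty
  -- index = {c: set() for c in codes.values()}
  let index0 : PySem.Dict String (PySem.Set String) :=
    (PySem.Dict.values codes).foldl (fun d c => PySem.Dict.insert d c PySem.Set.empty)
      PySem.Dict.empty
  -- for w, c in codes.items(): index[c].add(w)   (c is always a key of index)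
  let index :=
    (PySem.Dict.items codes).foldl
      (fun d wc => PySem.Dict.modify d wc.2 [] (fun s => PySem.Set.add s wc.1)) index0
  PySem.Dict.items index

-- ===== PRECONDITION & SPEC =====
-- Pre_ excludes inputs with an empty-string key, on which A's name[0] raises IndexError.
def Pre_create_soundex_index (inverted_index : List (String × List Int)) : Prop :=
  ∀ p ∈ inverted_index, p.1 ≠ ""
instance (inverted_index : List (String × List Int)) : Decidable (Pre_create_soundex_index inverted_index) := by unfold Pre_create_soundex_index; infer_instance

def pvWitness_create_soundex_index : (List (String × List Int)) :=
  [("Robert", [1, 2]), ("rupert", [3]), ("ashcraft", [2])]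

def Spec_create_soundex_index (inverted_index : List (String × List Int)) (out : List (String × List String)) : Prop := out = create_soundex_index_alt inverted_index
instance (inverted_index : List (String × List Int)) (out : List (String × List String)) : Decidable (Spec_create_soundex_index inverted_index out) := by unfold Spec_create_soundex_index; infer_instance

-- ===== CLAIM (what is proved, stated in full; the proofs are below) =====
def Claim_equal_create_soundex_index : Prop := ∀ (inverted_index : List (String × List Int)), Dom_create_soundex_index inverted_index → Pre_create_soundex_index inverted_index → Spec_create_soundex_index inverted_index (create_soundex_index inverted_index)

-- ===== LEMMAS AND PROOFS =====

lemma innerLoopA_eq_digitB (c : Char) :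
    innerLoopA conversionsA c = if digitB c = '.' then none else some (digitB c) := by
  by_cases hr : 'A' ≤ c ∧ c ≤ 'Z'
  · have h1 : 65 ≤ c.toNat := by
      have := hr.1; simp [Char.le_def, UInt32.le_iff_toNat_le] at this; exact this
    have h2 : c.toNat ≤ 90 := by
      have := hr.2; simp [Char.le_def, UInt32.le_iff_toNat_le] at this; exact this
    have key : ∀ n < 91, 65 ≤ n →
        innerLoopA conversionsA (Char.ofNat n)
          = if digitB (Char.ofNat n) = '.' then none else some (digitB (Char.ofNat n)) := by
      decide
    have := key c.toNat (by omega) h1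
    rwa [Char.ofNat_toNat] at this
  · have hne : ∀ d : Char, 65 ≤ d.toNat → d.toNat ≤ 90 → c ≠ d := by
      intro d hd1 hd2 he
      subst he
      exact hr ⟨by simp [Char.le_def, UInt32.le_iff_toNat_le]; omega,
                by simp [Char.le_def, UInt32.le_iff_toNat_le]; omega⟩
    simp only [digitB, if_neg hr]
    simp [innerLoopA, conversionsA, List.contains_eq_mem,
      show "BFPV".toList = ['B','F','P','V'] from by decide,
      show "CGJKQSXZ".toList = ['C','G','J','K','Q','S','X','Z'] from by decide,
      show "DT".toList = ['D','T'] from by decide,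
      show "L".toList = ['L'] from by decide,
      show "MN".toList = ['M','N'] from by decide,
      show "R".toList = ['R'] from by decide,
      hne 'B' (by decide) (by decide), hne 'F' (by decide) (by decide), hne 'P' (by decide) (by decide), hne 'V' (by decide) (by decide),
      hne 'C' (by decide) (by decide), hne 'G' (by decide) (by decide), hne 'J' (by decide) (by decide), hne 'K' (by decide) (by decide),
      hne 'Q' (by decide) (by decide), hne 'S' (by decide) (by decide), hne 'X' (by decide) (by decide), hne 'Z' (by decide) (by decide),
      hne 'D' (by decide) (by decide), hne 'T' (by decide) (by decide), hne 'L' (by decide) (by decide), hne 'M' (by decide) (by decide),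
      hne 'N' (by decide) (by decide), hne 'R' (by decide) (by decide)]

lemma loopA_eq_tailB (cs : List Char) : ∀ (s : List Char) (p : Char) (k : Nat),
    s.getLast? = some p → s.length + k = 4 → 1 ≤ k →
    soundexLoopA cs s ++ List.replicate (4 - (soundexLoopA cs s).length) '0'
      = s ++ tailB cs p k := by
  induction cs with
  | nil =>
    intro s p k hp hlen hk
    match k, hk with
    | k + 1, _ =>
      simp [soundexLoopA, tailB]
      omega
  | cons c rest ih =>
    intro s p k hp hlen hk
    have hs1 : 1 ≤ s.length := by
      cases s
      · simp at hp
      · simp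
    simp only [soundexLoopA, innerLoopA_eq_digitB]
    by_cases hdot : digitB c = '.'
    · -- no digit: state unchanged
      simp only [if_pos hdot]
      have h4 : ¬ (s.length = 4) := by omega
      simp only [if_neg h4]
      match k, hk with
      | k + 1, _ =>
        have : tailB (c :: rest) p (k + 1) = tailB rest p (k + 1) := by
          simp [tailB, hdot]
        rw [this]
        exact ih s p (k + 1) hp hlen (by omega)
    · simp only [if_neg hdot]
      by_cases hdp : digitB c = p
      · -- same as previous: not appended
        have hl : ¬ (s.getLast? ≠ some (digitB c)) := by rw [hp, hdp]; simp
        simp only [if_neg hl]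
        have h4 : ¬ (s.length = 4) := by omega
        simp only [if_neg h4]
        match k, hk with
        | k + 1, _ =>
          have : tailB (c :: rest) p (k + 1) = tailB rest p (k + 1) := by
            simp [tailB, hdp]
          rw [this]
          exact ih s p (k + 1) hp hlen (by omega)
      · -- new digit appended
        have hl : s.getLast? ≠ some (digitB c) := by rw [hp]; simp only [ne_eq, Option.some.injEq]; exact fun h => hdp h.symm
        simp only [if_pos hl]
        have htl : tailB (c :: rest) p k = digitB c :: tailB rest (digitB c) (k - 1) := by
          match k, hk with
          | k + 1, _ => simp [tailB, hdot, hdp]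
        by_cases h4 : (s ++ [digitB c]).length = 4
        · have hk1 : k = 1 := by simp at h4; omega
          subst hk1
          simp only [if_pos h4]
          rw [htl]
          simp [tailB, h4]
        · simp only [if_neg h4]
          have hk2 : 2 ≤ k := by simp at h4; omega
          rw [htl]
          have := ih (s ++ [digitB c]) (digitB c) (k - 1) (by simp)
            (by simp; omega) (by omega)
          rw [this]
          match k, hk2 with
          | k + 2, _ => simp

lemma soundexA_eq_soundexB (name : String) : soundexA name = soundexB name := by
  unfold soundexA soundexB
  cases hu : PySem.Chars.upper name.toList with
  | nil => rfl
  | cons f rest =>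
    simp only []
    congr 1
    have := loopA_eq_tailB rest [f] f 3 (by simp) (by simp) (by omega)
    simpa using this

-- master: a fold of Set.add from any accumulator appends the dedup of the fresh elements
lemma foldl_add_acc {α : Type} [BEq α] [LawfulBEq α] :
    ∀ (n : Nat) (xs : List α), xs.length ≤ n → ∀ (acc : PySem.Set α),
      List.foldl PySem.Set.add acc xs
        = acc ++ List.foldl PySem.Set.add [] (xs.filter (fun a => !acc.contains a)) := by
  intro n
  induction n with
  | zero =>
    intro xs h acc
    match xs, h with
    | [], _ => simp
  | succ n ih =>
    intro xs h acc
    match xs with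
    | [] => simp
    | x :: xs =>
      simp only [List.foldl_cons, List.filter_cons]
      by_cases hx : x ∈ acc
      · have hc : (!PySem.Set.contains acc x) = false := by
          simp [PySem.Set.contains_eq_listContains, hx]
        rw [PySem.Set.add_of_mem hx]
        rw [if_neg (by rw [hc]; exact Bool.false_ne_true)]
        exact ih xs (by simpa using h) acc
      · have hc : (!PySem.Set.contains acc x) = true := by
          simp [PySem.Set.contains_eq_listContains, hx]
        rw [PySem.Set.add_of_not_mem hx]
        rw [if_pos hc]
        rw [ih xs (by simpa using h) (acc ++ [x])]
        have base : List.foldl PySem.Set.add [] (x :: xs.filter (fun a => !acc.contains a))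
            = List.foldl PySem.Set.add [x] (xs.filter (fun a => !acc.contains a)) := by
          simp [PySem.Set.add]
        rw [base, ih (xs.filter (fun a => !acc.contains a))
            (le_trans (List.length_filter_le _ _) (by simpa using h)) [x]]
        rw [List.filter_filter]
        have hfe : (xs.filter (fun a => !(acc ++ [x]).contains a))
            = xs.filter (fun a => !PySem.Set.contains [x] a && !acc.contains a) := by
          apply List.filter_congr
          intro a _
          by_cases h1 : a = x <;> by_cases h2 : a ∈ acc <;>
            simp [PySem.Set.contains_eq_listContains, List.contains_eq_mem, h1, h2]
        rw [hfe]
        simp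

lemma ofList_cons {α : Type} [BEq α] [LawfulBEq α] (x : α) (xs : List α) :
    PySem.Set.ofList (x :: xs) = x :: PySem.Set.ofList (xs.filter (fun a => !(a == x))) := by
  rw [PySem.Set.ofList_eq_foldl, PySem.Set.ofList_eq_foldl]
  have h0 : List.foldl PySem.Set.add [] (x :: xs) = List.foldl PySem.Set.add [x] xs := by
    simp [PySem.Set.add]
  rw [h0, foldl_add_acc xs.length xs le_rfl [x]]
  simp only [List.singleton_append]
  congr 2
  apply List.filter_congr
  intro a _
  by_cases hax : a = x <;> simp [PySem.Set.contains_eq_listContains, List.contains_eq_mem, hax]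

lemma ofList_of_nodup {α : Type} [BEq α] [LawfulBEq α] :
    ∀ (xs : List α), xs.Nodup → PySem.Set.ofList xs = xs := by
  intro xs
  induction xs with
  | nil => intro _; rfl
  | cons x xs ih =>
    intro hn
    rw [ofList_cons]
    have : xs.filter (fun a => !(a == x)) = xs := by
      apply List.filter_eq_self.mpr
      intro a ha
      have hne : a ≠ x := fun he => (List.nodup_cons.mp hn).1 (he ▸ ha)
      simp [hne]
    rw [this, ih (List.nodup_cons.mp hn).2]

lemma ofList_filter {α : Type} [BEq α] [LawfulBEq α] :
    ∀ (n : Nat) (xs : List α), xs.length ≤ n → ∀ (p : α → Bool),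
      PySem.Set.ofList (xs.filter p) = (PySem.Set.ofList xs).filter p := by
  intro n
  induction n with
  | zero =>
    intro xs h p
    match xs, h with
    | [], _ => rfl
  | succ n ih =>
    intro xs h p
    match xs with
    | [] => rfl
    | x :: xs =>
      rw [ofList_cons, List.filter_cons]
      by_cases hp : p x = true
      · rw [if_pos hp, ofList_cons, List.filter_cons, if_pos hp]
        congr 1
        rw [← ih (xs.filter (fun a => !(a == x))) (le_trans (List.length_filter_le _ _) (by simpa using h)) p,
          List.filter_filter, List.filter_filter]
        congr 1
        apply List.filter_congr
        intro a _
        exact Bool.and_comm _ _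
      · rw [if_neg hp, List.filter_cons, if_neg hp]
        rw [← ih (xs.filter (fun a => !(a == x))) (le_trans (List.length_filter_le _ _) (by simpa using h)) p]
        rw [List.filter_filter]
        have heq : xs.filter (fun a => p a && !(a == x)) = xs.filter p := by
          apply List.filter_congr
          intro a _
          by_cases hax : a = x
          · subst hax; simp [hp]
          · simp [hax]
        rw [heq]

lemma ofList_map_ofList {α β : Type} [BEq α] [LawfulBEq α] [BEq β] [LawfulBEq β] (f : α → β) :
    ∀ (n : Nat) (xs : List α), xs.length ≤ n →
      PySem.Set.ofList ((PySem.Set.ofList xs).map f) = PySem.Set.ofList (xs.map f) := by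
  intro n
  induction n with
  | zero =>
    intro xs h
    match xs, h with
    | [], _ => rfl
  | succ n ih =>
    intro xs h
    match xs with
    | [] => rfl
    | x :: xs =>
      rw [ofList_cons, List.map_cons, ofList_cons, List.map_cons, ofList_cons]
      congr 1
      -- LHS: ofList (((ofList (xs.filter (≠x))).map f).filter (≠ f x))
      have heq : xs.filter (fun a => !(f a == f x) && !(a == x))
          = xs.filter (fun a => !(f a == f x)) := by
        apply List.filter_congr
        intro a _
        by_cases hfa : f a = f x
        · simp [hfa]
        · have hax : a ≠ x := fun he => hfa (he ▸ rfl)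
          simp [hfa, hax]
      rw [List.filter_map, List.filter_map]
      simp only [Function.comp_def]
      rw [← ofList_filter (xs.filter (fun a => !(a == x))).length _ le_rfl
            (fun a => !(f a == f x))]
      rw [List.filter_filter, heq]
      exact ih (xs.filter (fun a => !(f a == f x)))
        (le_trans (List.length_filter_le _ _) (by simpa using h))

lemma getD_foldA (f : String → String) :
    ∀ (ws : List String) (d : PySem.Dict String (PySem.Set String)) (c : String),
      (ws.foldl (fun d w => d.insert (f w) (PySem.Set.add (d.getD (f w) []) w)) d).getD c []
        = (ws.filter (fun w => f w == c)).foldl PySem.Set.add (d.getD c []) := by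
  intro ws
  induction ws with
  | nil => intro d c; rfl
  | cons w rest ih =>
    intro d c
    simp only [List.foldl_cons, List.filter_cons]
    rw [ih]
    by_cases hc : f w = c
    · rw [if_pos (by simp [hc])]
      simp only [List.foldl_cons]
      congr 1
      rw [PySem.Dict.getD_insert]
      rw [if_pos hc.symm, hc]
    · rw [if_neg (by simp [hc])]
      congr 1
      rw [PySem.Dict.getD_insert, if_neg (fun h => hc h.symm)]

lemma getD_codes (f : String → String) :
    ∀ (ws : List String) (d : PySem.Dict String String) (w : String) (dflt : String),
      (ws.foldl (fun d w => d.insert w (f w)) d).getD w dflt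
        = if w ∈ ws then f w else d.getD w dflt := by
  intro ws
  induction ws with
  | nil => intro d w dflt; simp
  | cons x rest ih =>
    intro d w dflt
    simp only [List.foldl_cons]
    rw [ih]
    by_cases hw : w ∈ rest
    · rw [if_pos hw, if_pos (by simp [hw])]
    · rw [if_neg hw]
      by_cases hx : w = x
      · rw [if_pos (by simp [hx]), PySem.Dict.getD_insert, if_pos hx, hx]
      · rw [if_neg (by simp [hx, hw]), PySem.Dict.getD_insert, if_neg hx]

lemma getD_pre :
    ∀ (cs : List String) (d : PySem.Dict String (PySem.Set String)),
      (∀ x, d.getD x [] = []) → ∀ c,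
      (cs.foldl (fun d c => d.insert c PySem.Set.empty) d).getD c [] = [] := by
  intro cs
  induction cs with
  | nil => intro d h c; exact h c
  | cons x rest ih =>
    intro d h c
    simp only [List.foldl_cons]
    apply ih
    intro y
    rw [PySem.Dict.getD_insert]
    by_cases hy : y = x
    · rw [if_pos hy]; rfl
    · rw [if_neg hy]; exact h y

lemma getD_fill :
    ∀ (ps : List (String × String)) (d : PySem.Dict String (PySem.Set String)) (c : String),
      (ps.foldl (fun d wc => d.modify wc.2 [] (fun s => PySem.Set.add s wc.1)) d).getD c []
        = (ps.filter (fun p => p.2 == c)).foldl (fun s p => PySem.Set.add s p.1) (d.getD c []) := by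
  intro ps
  induction ps with
  | nil => intro d c; rfl
  | cons p rest ih =>
    intro d c
    simp only [List.foldl_cons, List.filter_cons]
    rw [ih]
    by_cases hc : p.2 = c
    · rw [if_pos (by simp [hc])]
      simp only [List.foldl_cons]
      congr 1
      rw [PySem.Dict.getD_modify, if_pos hc.symm, hc]
    · rw [if_neg (by simp [hc])]
      congr 1
      rw [PySem.Dict.getD_modify, if_neg (fun h => hc h.symm)]

lemma update_of_mem :
    ∀ (xs : List String) (s : PySem.Set String), (∀ x ∈ xs, x ∈ s) → PySem.Set.update s xs = s := by
  intro xs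
  induction xs with
  | nil => intro s _; rfl
  | cons x rest ih =>
    intro s h
    have : PySem.Set.update s (x :: rest) = PySem.Set.update (PySem.Set.add s x) rest := rfl
    rw [this, PySem.Set.add_of_mem (h x (by simp))]
    exact ih s (fun y hy => h y (by simp [hy]))

-- canonical grouping both sides reduce to
def canonical (ws : List String) : List (String × List String) :=
  (PySem.Set.ofList (ws.map soundexB)).map
    (fun c => (c, PySem.Set.ofList (ws.filter (fun w => soundexB w == c))))

lemma update_nil_eq_ofList (l : List String) :
    PySem.Set.update ([] : PySem.Set String) l = PySem.Set.ofList l := by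
  rw [PySem.Set.ofList_eq_foldl]; rfl

lemma itemsA (inv : List (String × List Int)) :
    create_soundex_index inv = canonical (inv.map Prod.fst) := by
  unfold create_soundex_index canonical
  set ws := inv.map Prod.fst with hws
  have hfun : (fun (d : PySem.Dict String (PySem.Set String)) word =>
      let code := soundexA word
      if PySem.Dict.contains d code then
        PySem.Dict.modify d code [] (fun s => PySem.Set.add s word)
      else
        PySem.Dict.insert d code (PySem.Set.ofList [word]))
      = (fun d w => d.insert (soundexB w) (PySem.Set.add (d.getD (soundexB w) []) w)) := by
    funext d w
    simp only [soundexA_eq_soundexB]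
    by_cases hc : PySem.Dict.contains d (soundexB w)
    · rw [if_pos hc]; rfl
    · rw [if_neg hc]
      rw [PySem.Dict.getD_of_not_contains d [] (by simpa using hc)]
      rfl
  rw [hfun]
  have hnd : ((ws.foldl (fun d w => d.insert (soundexB w) (PySem.Set.add (d.getD (soundexB w) []) w)) PySem.Dict.empty)).keys.Nodup :=
    PySem.Dict.nodup_keys_foldl_insert_key ws soundexB _ _ PySem.Dict.nodup_keys_empty
  rw [PySem.Dict.items_eq_map_keys _ hnd []]
  rw [PySem.Dict.keys_foldl_insert_key, PySem.Dict.keys_empty, update_nil_eq_ofList]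
  apply List.map_congr_left
  intro c _
  congr 1
  rw [getD_foldA, PySem.Dict.getD_empty, PySem.Set.ofList_eq_foldl]

lemma itemsB (inv : List (String × List Int)) :
    create_soundex_index_alt inv = canonical (inv.map Prod.fst) := by
  unfold create_soundex_index_alt canonical
  dsimp only
  set ws := inv.map Prod.fst with hws
  set C := ws.foldl (fun d w => PySem.Dict.insert d w (soundexB w)) PySem.Dict.empty with hC
  have hndC : C.keys.Nodup := by
    rw [hC]
    have := PySem.Dict.nodup_keys_foldl_insert_key ws (fun w => w)
      (fun _ w => soundexB w) PySem.Dict.empty PySem.Dict.nodup_keys_empty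
    simpa using this
  have hkeysC : C.keys = PySem.Set.ofList ws := by
    rw [hC]
    have := PySem.Dict.keys_foldl_insert_key ws (fun w => w)
      (fun _ w => soundexB w) (PySem.Dict.empty : PySem.Dict String String)
    simp only at this
    rw [this, PySem.Dict.keys_empty, update_nil_eq_ofList]
    simp
  have hitemsC : C.items = (PySem.Set.ofList ws).map (fun w => (w, soundexB w)) := by
    rw [PySem.Dict.items_eq_map_keys C hndC "", hkeysC]
    apply List.map_congr_left
    intro w hw
    congr 1
    rw [hC]
    have := getD_codes soundexB ws PySem.Dict.empty w ""
    rw [this, if_pos ((PySem.Set.mem_ofList ws w).mp hw)]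
  have hvalsC : C.values = (PySem.Set.ofList ws).map soundexB := by
    have : C.values = C.items.map (·.2) := rfl
    rw [this, hitemsC, List.map_map]
    rfl
  rw [hitemsC, hvalsC]
  set us := PySem.Set.ofList ws with hus
  set index0 := ((us.map soundexB).foldl (fun d c => PySem.Dict.insert d c PySem.Set.empty)
      PySem.Dict.empty : PySem.Dict String (PySem.Set String)) with hI0
  have hndI0 : index0.keys.Nodup := by
    rw [hI0]
    have := PySem.Dict.nodup_keys_foldl_insert_key (us.map soundexB) (fun c => c)
      (fun _ _ => (PySem.Set.empty : PySem.Set String)) PySem.Dict.empty PySem.Dict.nodup_keys_empty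
    simpa using this
  have hkeysI0 : index0.keys = PySem.Set.ofList (us.map soundexB) := by
    rw [hI0]
    have := PySem.Dict.keys_foldl_insert_key (us.map soundexB) (fun c => c)
      (fun _ _ => (PySem.Set.empty : PySem.Set String)) (PySem.Dict.empty : PySem.Dict String (PySem.Set String))
    simp only at this
    rw [this, PySem.Dict.keys_empty, update_nil_eq_ofList]
    congr 1
    simp
  set fill := ((us.map (fun w => (w, soundexB w))).foldl
      (fun d (wc : String × String) => PySem.Dict.modify d wc.2 [] (fun s => PySem.Set.add s wc.1)) index0) with hF
  have hndF : fill.keys.Nodup := by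
    rw [hF]
    exact PySem.Dict.nodup_keys_foldl_modify_key _ (fun wc : String × String => wc.2) []
      (fun _ wc => fun s => PySem.Set.add s wc.1) index0 hndI0
  have hkeysF : fill.keys = PySem.Set.ofList (us.map soundexB) := by
    rw [hF]
    have := PySem.Dict.keys_foldl_modify_key (us.map (fun w => (w, soundexB w)))
      (fun wc : String × String => wc.2) ([] : PySem.Set String)
      (fun _ wc => fun s => PySem.Set.add s wc.1) index0
    rw [this, hkeysI0]
    have hmap : (us.map (fun w => (w, soundexB w))).map (fun wc : String × String => wc.2) = us.map soundexB := by
      rw [List.map_map]; rfl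
    rw [hmap]
    apply update_of_mem
    intro x hx
    exact (PySem.Set.mem_ofList _ x).mpr hx
  rw [PySem.Dict.items_eq_map_keys fill hndF [], hkeysF]
  -- keys agree
  have hkeq : PySem.Set.ofList (us.map soundexB) = PySem.Set.ofList (ws.map soundexB) := by
    rw [hus]
    exact ofList_map_ofList soundexB ws.length ws le_rfl
  rw [hkeq]
  apply List.map_congr_left
  intro c _
  congr 1
  rw [hF]
  rw [getD_fill]
  rw [hI0, getD_pre _ _ (fun x => PySem.Dict.getD_empty x [])]
  rw [List.filter_map]
  have hcomp : ((fun p : String × String => p.2 == c) ∘ (fun w => (w, soundexB w)))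
      = (fun w => soundexB w == c) := rfl
  rw [hcomp, List.foldl_map]
  have : (fun (s : PySem.Set String) (w : String) => PySem.Set.add s w) = PySem.Set.add := rfl
  rw [this, ← PySem.Set.ofList_eq_foldl]
  -- ofList of a filtered nodup list is itself; compare with ofList (ws.filter …)
  have hnodup : (us.filter (fun w => soundexB w == c)).Nodup :=
    List.Nodup.filter _ (by rw [hus]; exact PySem.Set.nodup_ofList ws)
  rw [ofList_of_nodup _ hnodup, hus,
    ← ofList_filter ws.length ws le_rfl (fun w => soundexB w == c)]

-- ===== VERDICT (by name: the statement is the Claim_ definition above) =====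
theorem create_soundex_index_spec : Claim_equal_create_soundex_index := by
  intro inv _ _
  unfold Spec_create_soundex_index
  rw [itemsA, itemsB]
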